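-- pv_equiv track=rewrite | github.com/megyoung430/magnitude-bandit-analysis | src/behavior_analysis/get_variables_across_sessions.py | merge_reversals_across_sessions
-- ===== SOURCE A (Python) =====
-- def merge_reversals_across_sessions(list_of_lists, start_offset=0):
--     """
--     list_of_lists: e.g. [[0,0,1,1], [0,0,0,1,1,2,2], ...]
--     Returns one list where each subsequent list is offset so the cumulative
--     count carries over across sessions.
--
--     The offset rule is: offset = last value of merged so far (not last+1).
--     """
--     merged = []
--     offset = start_offset
--     for i, lst in enumerate(list_of_lists):
--         if not lst:
--             continue
--         shifted = [int(x) + offset for x in lst]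
--         merged.extend(shifted)
--         offset = merged[-1]
--     return merged
-- ===== SOURCE B (Python) =====
-- def merge_reversals_across_sessions(list_of_lists, start_offset=0):
--     # Differencing + prefix-sum: encode each non-empty session as
--     # [first value, successive differences]; the merged result is the
--     # running sum of the whole delta stream seeded with start_offset.
--     # Correct because the differences telescope back to the original
--     # values, and a session's first delta (its raw first value) lands
--     # on top of the previous output value = A's offset rule.
--     deltas = []
--     for lst in list_of_lists:
--         if lst:
--             vals = [int(x) for x in lst]
--             deltas.append(vals[0])
--             deltas.extend(b - a for a, b in zip(vals, vals[1:]))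
--     out = []
--     acc = start_offset
--     for d in deltas:
--         acc += d
--         out.append(acc)
--     return out
-- ===== Notes on version B (the rewrite author's own statement) =====
-- stated objective: alternative
-- what changed: B replaces A's stateful offset-carrying merge with a differencing/prefix-sum algorithm: it flattens the non-empty sessions into a single delta stream (first value, then successive in-session differences) and reconstructs the output as one global running sum seeded with start_offset; no per-session offset is ever computed.
import Mathlib
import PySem

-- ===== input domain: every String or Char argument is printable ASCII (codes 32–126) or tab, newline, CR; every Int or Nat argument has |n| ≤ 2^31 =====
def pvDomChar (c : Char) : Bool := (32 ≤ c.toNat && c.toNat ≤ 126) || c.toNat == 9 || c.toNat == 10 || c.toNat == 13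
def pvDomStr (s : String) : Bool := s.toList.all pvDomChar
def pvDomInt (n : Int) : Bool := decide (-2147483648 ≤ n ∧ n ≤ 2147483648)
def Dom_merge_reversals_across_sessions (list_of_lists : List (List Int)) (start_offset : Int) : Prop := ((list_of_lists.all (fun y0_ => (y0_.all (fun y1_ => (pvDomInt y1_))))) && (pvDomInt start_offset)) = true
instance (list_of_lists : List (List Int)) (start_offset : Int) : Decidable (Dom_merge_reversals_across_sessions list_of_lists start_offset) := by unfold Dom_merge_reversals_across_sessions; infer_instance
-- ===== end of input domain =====

-- B rebuilds the result by differencing each non-empty session into a delta stream and taking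
-- one global prefix sum seeded with start_offset, instead of A's stateful offset-carrying merge;
-- objective: alternative.

-- ===== PORT A =====
-- A's loop: skip empty lists, extend merged with the shifted list, read offset back as merged[-1].
def mergeA_loop : List (List Int) → List Int → Int → List Int
  | [], merged, _ => merged
  | lst :: rest, merged, offset =>
    if lst.isEmpty then mergeA_loop rest merged offset
    else
      let shifted := lst.map (fun x => x + offset)
      let merged' := merged ++ shifted
      let offset' := (PySem.List.pyGet? merged' (-1)).getD offset  -- merged[-1]; never none here
      mergeA_loop rest merged' offset'

def merge_reversals_across_sessions (list_of_lists : List (List Int)) (start_offset : Int) : List Int :=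
  mergeA_loop list_of_lists [] start_offset

-- ===== PORT B =====
-- delta stream: for each non-empty list, its first value then successive differences.
def mergeB_deltas : List (List Int) → List Int
  | [] => []
  | lst :: rest =>
    (match lst with
     | [] => []
     | v :: _ => v :: ((lst.zip lst.tail).map (fun p => p.2 - p.1))) ++ mergeB_deltas rest

-- running sum over the delta stream (acc += d; out.append(acc)).
def mergeB_acc : List Int → Int → List Int
  | [], _ => []
  | d :: ds, acc => (acc + d) :: mergeB_acc ds (acc + d)

def merge_reversals_across_sessions_alt (list_of_lists : List (List Int)) (start_offset : Int) : List Int :=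
  mergeB_acc (mergeB_deltas list_of_lists) start_offset

-- ===== PRECONDITION & SPEC =====
def Spec_merge_reversals_across_sessions (list_of_lists : List (List Int)) (start_offset : Int) (out : List Int) : Prop := out = merge_reversals_across_sessions_alt list_of_lists start_offset
instance (list_of_lists : List (List Int)) (start_offset : Int) (out : List Int) : Decidable (Spec_merge_reversals_across_sessions list_of_lists start_offset out) := by unfold Spec_merge_reversals_across_sessions; infer_instance

-- ===== CLAIM (what is proved, stated in full; the proofs are below) =====
def Claim_equal_merge_reversals_across_sessions : Prop := ∀ (list_of_lists : List (List Int)) (start_offset : Int), Dom_merge_reversals_across_sessions list_of_lists start_offset → Spec_merge_reversals_across_sessions list_of_lists start_offset (merge_reversals_across_sessions list_of_lists start_offset)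

-- ===== LEMMAS AND PROOFS =====

-- running sum splits over append: the tail continues from acc plus the head's total.
theorem mergeB_acc_append (a b : List Int) (acc : Int) :
    mergeB_acc (a ++ b) acc = mergeB_acc a acc ++ mergeB_acc b (acc + a.sum) := by
  induction a generalizing acc with
  | nil => simp [mergeB_acc]
  | cons d ds ih => simp [mergeB_acc, ih, add_assoc]

-- prefix-summing the in-session differences of v::vs starting at off+v yields vs shifted by off.
theorem mergeB_acc_diffs (v : Int) (vs : List Int) (off : Int) :
    mergeB_acc (((v :: vs).zip vs).map (fun p => p.2 - p.1)) (off + v)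
      = vs.map (fun x => x + off) := by
  induction vs generalizing v with
  | nil => simp [mergeB_acc]
  | cons w ws ih =>
    have h : off + v + (w - v) = off + w := by ring
    simp only [List.zip, List.zipWith, List.map, mergeB_acc, h, List.cons.injEq]
    exact ⟨by ring, by simpa [List.zip] using ih w⟩

-- the deltas of a non-empty session telescope to its last value.
theorem mergeB_deltas_sum (v : Int) (vs : List Int) :
    (v :: ((v :: vs).zip vs).map (fun p => p.2 - p.1)).sum = (v :: vs).getLast (by simp) := by
  induction vs generalizing v with
  | nil => simp
  | cons w ws ih =>
    have := ih w
    simp only [List.zip, List.zipWith, List.map, List.sum_cons] at this ⊢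
    rw [List.getLast_cons (by simp)]
    omega

-- A's loop equals "merged ++ B's result from the current offset".
theorem mergeA_loop_eq (ll : List (List Int)) (merged : List Int) (off : Int) :
    mergeA_loop ll merged off = merged ++ mergeB_acc (mergeB_deltas ll) off := by
  induction ll generalizing merged off with
  | nil => simp [mergeA_loop, mergeB_deltas, mergeB_acc]
  | cons lst rest ih =>
    match lst with
    | [] => simp [mergeA_loop, mergeB_deltas, ih]
    | v :: vs =>
      have hs : ((v :: vs).map (fun x => x + off)) ≠ [] := by simp
      rw [mergeA_loop]
      simp only [List.isEmpty_cons, if_false, Bool.false_eq_true]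
      rw [ih, PySem.List.pyGet?_neg_one,
          List.getLast?_append_of_ne_nil _ hs,
          List.getLast?_eq_some_getLast hs, Option.getD_some]
      show merged ++ _ ++ _ = merged ++ mergeB_acc (mergeB_deltas ((v :: vs) :: rest)) off
      rw [mergeB_deltas, List.append_assoc]
      congr 1
      rw [mergeB_acc_append, mergeB_acc]
      have hd : ((v :: vs).zip (v :: vs).tail) = ((v :: vs).zip vs) := rfl
      rw [hd, mergeB_acc_diffs v vs off, mergeB_deltas_sum v vs]
      congr 2
      · simp [add_comm]
      · rw [List.getLast_map]; ring_nf

-- ===== VERDICT (by name: the statement is the Claim_ definition above) =====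
theorem merge_reversals_across_sessions_spec : Claim_equal_merge_reversals_across_sessions := by
  intro ll s _
  show _ = _
  rw [merge_reversals_across_sessions, mergeA_loop_eq]
  rfl
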